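-- pv_equiv track=rewrite | github.com/AmazonBBQ/RevAgent | dynamic_mcp_server/dynamic_mcp_server_v03.py | _parse_gdb_backtrace
-- ===== SOURCE A (Python) =====
-- def _parse_gdb_backtrace(output: str) -> str:
--     """提取 bt 输出"""
--     lines = []
--     capturing = False
--     for line in output.split("\n"):
--         if line.strip().startswith("#0 "):
--             capturing = True
--         if capturing:
--             if line.strip().startswith("#") or line.strip().startswith("from "):
--                 lines.append(line.strip())
--             elif lines:
--                 break
--     return "\n".join(lines[:10])
-- ===== SOURCE B (Python) =====
-- def _parse_gdb_backtrace(output: str) -> str: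
--     stripped = [ln.strip() for ln in output.split("\n")]
--     # classify every line once into a one-char tag, then work on the tag string
--     def tag(s: str) -> str:
--         if s.startswith("#0 "):
--             return "z"
--         if s.startswith("#") or s.startswith("from "):
--             return "f"
--         return "."
--     tags = "".join(map(tag, stripped))
--     start = tags.find("z")
--     if start == -1:
--         return ""
--     end = tags.find(".", start)
--     if end == -1:
--         end = len(tags)
--     return "\n".join(stripped[start:end][:10])
-- ===== Notes on version B (the rewrite author's own statement) =====
-- stated objective: alternative
-- what changed: B classifies every stripped line once into a one-character tag ('z' for '#0 ', 'f' for other frame lines, '.' otherwise), builds the tag string, and locates the backtrace block purely with string find operations (find 'z', then find '.' from there) and list slicing, replacing A's single stateful capturing-flag loop with break.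
import Mathlib
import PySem

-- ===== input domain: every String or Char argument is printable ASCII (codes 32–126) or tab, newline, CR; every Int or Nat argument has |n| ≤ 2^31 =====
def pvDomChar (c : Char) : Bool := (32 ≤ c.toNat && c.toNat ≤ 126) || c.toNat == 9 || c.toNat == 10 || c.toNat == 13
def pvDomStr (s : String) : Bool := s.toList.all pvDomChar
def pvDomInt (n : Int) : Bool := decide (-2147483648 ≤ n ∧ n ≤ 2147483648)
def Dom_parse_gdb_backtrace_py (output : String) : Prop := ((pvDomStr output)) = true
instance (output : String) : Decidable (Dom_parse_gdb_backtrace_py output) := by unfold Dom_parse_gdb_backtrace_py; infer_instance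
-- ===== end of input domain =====

-- B replaces A's stateful capturing-flag loop by a per-line tag string searched with find/findFrom and sliced (alternative decomposition, same cost).

-- ===== PORT A =====
-- A's for-loop over output.split("\n") with `lines`, `capturing` and `break`, as structural recursion.
def pvLoopA : List String → List String → Bool → List String
  | [], acc, _ => acc
  | l :: rest, acc, capturing =>
    let capturing := if PySem.Str.startswith (PySem.Str.strip l) "#0 " then true else capturing
    if capturing then
      if PySem.Str.startswith (PySem.Str.strip l) "#" || PySem.Str.startswith (PySem.Str.strip l) "from " then
        pvLoopA rest (acc ++ [PySem.Str.strip l]) capturing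
      else if acc.isEmpty then pvLoopA rest acc capturing
      else acc
    else pvLoopA rest acc capturing

-- output.split("\n"): sep is the nonempty literal, exact via Chars.splitOn
def pvSplitNL (output : String) : List String :=
  (PySem.Chars.splitOn output.toList "\n".toList).map String.ofList

def parse_gdb_backtrace_py (output : String) : String :=
  PySem.Str.join "\n" ((pvLoopA (pvSplitNL output) [] false).take 10)

-- ===== PORT B =====
-- Source B's tag(): one classification character per stripped line
def pvTag (s : String) : Char :=
  if PySem.Str.startswith s "#0 " then 'z'
  else if PySem.Str.startswith s "#" || PySem.Str.startswith s "from " then 'f'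
  else '.'

-- Source B: tags = ''.join(map(tag, stripped)); start = tags.find('z'); end = tags.find('.', start);
-- the Python str tags is represented as its List Char (exact)
def parse_gdb_backtrace_py_alt (output : String) : String :=
  let stripped := (pvSplitNL output).map PySem.Str.strip
  let tags := stripped.map pvTag
  let start := PySem.Chars.find tags ['z']
  if start = -1 then ""
  else
    let e := PySem.Chars.findFrom tags ['.'] start none
    let e := if e = -1 then (tags.length : Int) else e
    PySem.Str.join "\n"
      (PySem.List.slice (PySem.List.slice stripped (some start) (some e)) none (some 10))

-- ===== PRECONDITION & SPEC =====
def Spec_parse_gdb_backtrace_py (output : String) (out : String) : Prop := out = parse_gdb_backtrace_py_alt output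
instance (output : String) (out : String) : Decidable (Spec_parse_gdb_backtrace_py output out) := by unfold Spec_parse_gdb_backtrace_py; infer_instance

-- ===== CLAIM (what is proved, stated in full; the proofs are below) =====
def Claim_equal_parse_gdb_backtrace_py : Prop := ∀ (output : String), Dom_parse_gdb_backtrace_py output → Spec_parse_gdb_backtrace_py output (parse_gdb_backtrace_py output)

-- ===== LEMMAS AND PROOFS =====

-- proof-only helpers: abstract characterisations shared by both sides
def pvFrameOK (s : String) : Bool :=
  PySem.Str.startswith s "#" || PySem.Str.startswith s "from "

def pvFindStart : List String → Option (List String)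
  | [] => none
  | s :: rest => if PySem.Str.startswith s "#0 " then some (s :: rest) else pvFindStart rest

theorem pv_hash0_hash (s : String) (h : PySem.Str.startswith s "#0 " = true) :
    PySem.Str.startswith s "#" = true := by
  simp only [PySem.Str.startswith_eq] at h ⊢
  rw [PySem.Chars.startswith_iff] at h ⊢
  exact List.IsPrefix.trans (by decide) h

theorem pvTag_eq_z (s : String) : pvTag s = 'z' ↔ PySem.Str.startswith s "#0 " = true := by
  unfold pvTag; split_ifs <;> simp_all

theorem pvTag_ne_dot (s : String) : pvTag s ≠ '.' ↔ pvFrameOK s = true := by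
  unfold pvTag pvFrameOK
  split_ifs with h1 h2
  · have h := pv_hash0_hash s h1
    simp at h ⊢
    exact Or.inl h
  · simp at h2 ⊢
    tauto
  · simp at h2 ⊢
    tauto

theorem pv_singleton_prefix_iff (c : Char) (l : List Char) : [c] <+: l ↔ l.head? = some c := by
  constructor
  · rintro ⟨t, rfl⟩; rfl
  · intro h; cases l with
    | nil => simp at h
    | cons a t => simp at h; subst h; exact ⟨t, rfl⟩

theorem pv_singleton_infix_iff (c : Char) (l : List Char) : [c] <:+: l ↔ c ∈ l := by
  constructor
  · rintro ⟨s, t, rfl⟩; simp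
  · intro h
    obtain ⟨s, t, rfl⟩ := List.append_of_mem h
    exact ⟨s, t, by simp⟩

theorem pvLoopA_capturing (ls : List String) (acc : List String) (hacc : acc ≠ []) :
    pvLoopA ls acc true = acc ++ (ls.map PySem.Str.strip).takeWhile pvFrameOK := by
  induction ls generalizing acc with
  | nil => simp [pvLoopA]
  | cons l rest ih =>
    have hstep : pvLoopA (l :: rest) acc true =
        (if pvFrameOK (PySem.Str.strip l) = true then
          pvLoopA rest (acc ++ [PySem.Str.strip l]) true
        else if acc.isEmpty = true then pvLoopA rest acc true else acc) := by
      simp only [pvLoopA, ite_self, pvFrameOK, if_true]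
      rfl
    rw [hstep, List.map_cons, List.takeWhile_cons]
    by_cases hp : pvFrameOK (PySem.Str.strip l) = true
    · rw [if_pos hp, if_pos hp, ih (acc ++ [PySem.Str.strip l]) (by simp)]
      simp
    · rw [if_neg hp, if_neg hp, if_neg (by simp [List.isEmpty_iff, hacc])]
      simp

-- A's loop = "find the first '#0 ' line among the stripped lines, then takeWhile frames"
theorem pvA_eq (ls : List String) :
    pvLoopA ls [] false =
      (match pvFindStart (ls.map PySem.Str.strip) with
        | none => []
        | some suffix => suffix.takeWhile pvFrameOK) := by
  induction ls with
  | nil => simp [pvLoopA, pvFindStart]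
  | cons l rest ih =>
    by_cases h0 : PySem.Str.startswith (PySem.Str.strip l) "#0 " = true
    · have hp : pvFrameOK (PySem.Str.strip l) = true := by
        unfold pvFrameOK
        rw [pv_hash0_hash _ h0]
        rfl
      have hstep : pvLoopA (l :: rest) [] false = pvLoopA rest [PySem.Str.strip l] true := by
        simp only [pvLoopA, h0, if_true]
        rw [if_pos (show (PySem.Str.startswith (PySem.Str.strip l) "#"
              || PySem.Str.startswith (PySem.Str.strip l) "from ") = true from hp)]
        rfl
      have hfind : pvFindStart ((l :: rest).map PySem.Str.strip)
          = some (PySem.Str.strip l :: rest.map PySem.Str.strip) := by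
        simp only [List.map_cons, pvFindStart]
        rw [if_pos h0]
      rw [hstep, pvLoopA_capturing rest [PySem.Str.strip l] (by simp), hfind]
      simp [hp]
    · have h0' : PySem.Str.startswith (PySem.Str.strip l) "#0 " = false := by
        simpa using h0
      have hstep : pvLoopA (l :: rest) [] false = pvLoopA rest [] false := by
        simp only [pvLoopA, h0', Bool.false_eq_true, if_false]
      have hfind : pvFindStart ((l :: rest).map PySem.Str.strip)
          = pvFindStart (rest.map PySem.Str.strip) := by
        simp only [List.map_cons, pvFindStart]
        rw [if_neg h0]
      rw [hstep, hfind, ih]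

theorem pvFindStart_none (ss : List String) (h : ∀ s ∈ ss, PySem.Str.startswith s "#0 " = false) :
    pvFindStart ss = none := by
  induction ss with
  | nil => rfl
  | cons s rest ih =>
    simp only [pvFindStart, h s (by simp), Bool.false_eq_true, if_false]
    exact ih (fun t ht => h t (by simp [ht]))

theorem pvFindStart_at (ss : List String) (i : Nat) (s : String)
    (hi : ss[i]? = some s) (hs : PySem.Str.startswith s "#0 " = true)
    (hmin : ∀ j < i, ∀ t, ss[j]? = some t → PySem.Str.startswith t "#0 " = false) :
    pvFindStart ss = some (ss.drop i) := by
  induction ss generalizing i with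
  | nil => simp at hi
  | cons a rest ih =>
    cases i with
    | zero =>
      simp at hi; subst hi
      simp only [pvFindStart]
      rw [if_pos hs]
      simp
    | succ i' =>
      have ha : PySem.Str.startswith a "#0 " = false := hmin 0 (by omega) a rfl
      simp only [pvFindStart, ha, Bool.false_eq_true, if_false, List.drop_succ_cons]
      exact ih i' (by simpa using hi)
        (fun j hj t ht => hmin (j+1) (by omega) t (by simpa using ht))

theorem pv_takeWhile_eq_take {α : Type} (p : α → Bool) (ss : List α) (k : Nat)
    (h1 : ∀ j < k, ∀ x, ss[j]? = some x → p x = true)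
    (h2 : ∀ x, ss[k]? = some x → p x = false) :
    ss.takeWhile p = ss.take k := by
  induction ss generalizing k with
  | nil => simp
  | cons a rest ih =>
    cases k with
    | zero =>
      have := h2 a rfl
      simp [this]
    | succ k' =>
      have ha : p a = true := h1 0 (by omega) a rfl
      simp only [List.takeWhile_cons, ha, if_true, List.take_succ_cons]
      rw [ih k' (fun j hj x hx => h1 (j+1) (by omega) x (by simpa using hx))
            (fun x hx => h2 x (by simpa using hx))]

theorem pv_takeWhile_all {α : Type} (p : α → Bool) (ss : List α)
    (h : ∀ x ∈ ss, p x = true) : ss.takeWhile p = ss := by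
  induction ss with
  | nil => rfl
  | cons a rest ih =>
    simp [h a (by simp), ih (fun x hx => h x (by simp [hx]))]

-- ===== VERDICT (by name: the statement is the Claim_ definition above) =====
theorem parse_gdb_backtrace_py_spec : Claim_equal_parse_gdb_backtrace_py := by
  intro output _
  unfold Spec_parse_gdb_backtrace_py parse_gdb_backtrace_py parse_gdb_backtrace_py_alt
  dsimp only
  rw [pvA_eq]
  set stripped := (pvSplitNL output).map PySem.Str.strip with hstr
  set tags := stripped.map pvTag with htags
  by_cases hf : PySem.Chars.find tags ['z'] = -1
  · -- no '#0 ' line anywhere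
    have hnil : pvFindStart stripped = none := by
      apply pvFindStart_none
      intro s hsmem
      by_contra hc
      have hz : 'z' ∈ tags := by
        rw [htags]; exact List.mem_map.mpr ⟨s, hsmem, (pvTag_eq_z s).mpr (by simpa using hc)⟩
      exact (PySem.Chars.find_eq_neg_one_iff tags ['z']).mp hf ((pv_singleton_infix_iff 'z' tags).mpr hz)
    rw [if_pos hf]
    simp only [hnil]
    simp [PySem.Str.join]
  · -- first '#0 ' line at index i
    have h0f : 0 ≤ PySem.Chars.find tags ['z'] := by
      have := PySem.Chars.neg_one_le_find tags ['z']
      omega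
    obtain ⟨hpre, hminp⟩ := PySem.Chars.find_spec h0f
    set i := (PySem.Chars.find tags ['z']).toNat with hidef
    have hfi : PySem.Chars.find tags ['z'] = (i : Int) := by omega
    have htagi : tags[i]? = some 'z' := by
      rw [← List.head?_drop]
      exact (pv_singleton_prefix_iff 'z' (tags.drop i)).mp hpre
    have hilen : i < tags.length := List.getElem?_eq_some_iff.mp htagi |>.1
    obtain ⟨s0, hs0, hs0z⟩ : ∃ s, stripped[i]? = some s ∧ pvTag s = 'z' := by
      rw [htags] at htagi
      rw [List.getElem?_map] at htagi
      cases h : stripped[i]? with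
      | none => rw [h] at htagi; simp at htagi
      | some s => rw [h] at htagi; simp at htagi; exact ⟨s, rfl, htagi⟩
    have hfind : pvFindStart stripped = some (stripped.drop i) := by
      apply pvFindStart_at stripped i s0 hs0 ((pvTag_eq_z s0).mp hs0z)
      intro j hj t ht
      by_contra hc
      apply hminp j hj
      rw [pv_singleton_prefix_iff, List.head?_drop, htags, List.getElem?_map, ht]
      simp
      exact (pvTag_eq_z t).mpr (by simpa using hc)
    rw [hfind, if_neg hf]
    have hlen : tags.length = stripped.length := by rw [htags]; simp
    have hdropmap : tags.drop i = (stripped.drop i).map pvTag := by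
      rw [htags, List.map_drop]
    have hff : PySem.Chars.findFrom tags ['.'] (PySem.Chars.find tags ['z']) none =
        if PySem.Chars.find (tags.drop i) ['.'] = -1 then -1
        else (i : Int) + PySem.Chars.find (tags.drop i) ['.'] := by
      rw [hfi]
      exact PySem.Chars.findFrom_natCast tags ['.'] i (Nat.le_of_lt hilen)
    by_cases hg : PySem.Chars.find (tags.drop i) ['.'] = -1
    · -- every line from i on is a frame line
      rw [hff, if_pos hg]
      simp only [reduceIte]
      have hall : (stripped.drop i).takeWhile pvFrameOK = stripped.drop i := by
        apply pv_takeWhile_all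
        intro x hx
        rw [← pvTag_ne_dot]
        intro hxd
        apply (PySem.Chars.find_eq_neg_one_iff _ _).mp hg
        rw [pv_singleton_infix_iff, hdropmap]
        exact List.mem_map.mpr ⟨x, hx, hxd⟩
      rw [hall, hfi, hlen]
      rw [PySem.List.slice_natCast]
      have hfull : List.take (stripped.length - i) (List.drop i stripped)
          = List.drop i stripped := List.take_of_length_le (by simp)
      have h10 : PySem.List.slice (List.take (stripped.length - i) (List.drop i stripped)) none (some (10 : Int))
          = (List.take (stripped.length - i) (List.drop i stripped)).take 10 := by
        have : ((10 : Nat) : Int) = (10 : Int) := by norm_num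
        rw [← this, PySem.List.slice_to_natCast]
      rw [h10, hfull]
    · -- first non-frame line after i at offset k
      have h0g : 0 ≤ PySem.Chars.find (tags.drop i) ['.'] := by
        have := PySem.Chars.neg_one_le_find (tags.drop i) ['.']
        omega
      obtain ⟨hpre2, hmin2⟩ := PySem.Chars.find_spec h0g
      set k := (PySem.Chars.find (tags.drop i) ['.']).toNat with hkdef
      have hgk : PySem.Chars.find (tags.drop i) ['.'] = (k : Int) := by omega
      rw [hff, if_neg hg, hgk]
      have hne : ¬((i : Int) + (k : Int) = -1) := by omega
      rw [if_neg hne]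
      dsimp only
      have htw : (stripped.drop i).takeWhile pvFrameOK = (stripped.drop i).take k := by
        apply pv_takeWhile_eq_take
        · intro j hj x hx
          rw [← pvTag_ne_dot]
          intro hxd
          apply hmin2 j hj
          rw [pv_singleton_prefix_iff, List.head?_drop, hdropmap, List.getElem?_map, hx]
          simp [hxd]
        · intro x hx
          have htk : (tags.drop i)[k]? = some '.' := by
            rw [← List.head?_drop]
            exact (pv_singleton_prefix_iff '.' ((tags.drop i).drop k)).mp hpre2
          rw [hdropmap, List.getElem?_map, hx] at htk
          simp at htk
          by_contra hc
          exact ((pvTag_ne_dot x).mpr (by simpa using hc)) htk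
      rw [htw, hfi]
      rw [PySem.List.slice_natCast_add]
      have h10 : PySem.List.slice ((stripped.drop i).take k) none (some (10 : Int))
          = ((stripped.drop i).take k).take 10 := by
        have : ((10 : Nat) : Int) = (10 : Int) := by norm_num
        rw [← this, PySem.List.slice_to_natCast]
      rw [h10]
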